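-- pv_equiv track=rewrite | github.com/tvc141003/ProjectIntroDS | DS_Project/src/data_module/make_dataset.py | extractCreditsInfo
-- ===== SOURCE A (Python) =====
-- def extractCreditsInfo(credits):
--     fields = ['Designer', 'Artist', 'Publisher']
--     result = {field: '' for field in fields}
--
--     for credit in credits:
--         test = credit.split(' ')
--         if test[0] in fields:
--             credit = credit.removeprefix(f'{test[0]} ').split(', ')
--             result[test[0]] = ', '.join(credit)
--     return tuple(result.values())
-- ===== SOURCE B (Python) =====
-- def extractCreditsInfo(credits):
--     def last_value(field):
--         value = ''
--         for credit in credits: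
--             if credit.split(' ')[0] == field:
--                 value = credit.removeprefix(field + ' ')
--         return value
--     return tuple(last_value(f) for f in ('Designer', 'Artist', 'Publisher'))
-- ===== Notes on version B (the rewrite author's own statement) =====
-- stated objective: simpler
-- what changed: B drops A's dict and its split(', ')/join(', ') identity round-trip: it loops over the three field names and, per field, takes the last credit whose first space-token equals the field, storing credit.removeprefix(field + ' ').
import Mathlib
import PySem

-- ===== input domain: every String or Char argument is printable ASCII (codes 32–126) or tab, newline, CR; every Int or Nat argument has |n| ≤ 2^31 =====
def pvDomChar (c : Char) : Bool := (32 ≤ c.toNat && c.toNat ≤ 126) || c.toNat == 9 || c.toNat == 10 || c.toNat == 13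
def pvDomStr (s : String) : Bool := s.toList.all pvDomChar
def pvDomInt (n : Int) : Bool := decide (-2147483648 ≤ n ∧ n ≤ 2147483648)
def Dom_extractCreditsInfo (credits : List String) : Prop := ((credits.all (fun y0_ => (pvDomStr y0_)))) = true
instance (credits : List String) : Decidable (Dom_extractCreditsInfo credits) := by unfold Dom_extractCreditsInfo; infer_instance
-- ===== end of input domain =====

-- B replaces A's dict-and-overwrite loop by a per-field scan for the last matching credit,
-- dropping A's split(', ')/join(', ') identity round-trip; objective: simpler.

-- ===== PORT A =====
-- strings are ported as their char lists (List Char), exact via PySem.Chars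
-- s.removeprefix(p) (helper shared by both ports): drop p if it is a prefix, else unchanged
def pyRemovePrefixC (s p : List Char) : List Char :=
  if PySem.Chars.startswith s p then s.drop p.length else s

-- fields = ['Designer', 'Artist', 'Publisher']
def pvFields : List (List Char) := ["Designer".toList, "Artist".toList, "Publisher".toList]

-- the loop body of A: split by ' ', if the first token is a field name, overwrite result[token]
-- with ', '.join(credit.removeprefix(f'{token} ').split(', '))
-- (splitOn never returns [], so `headD []` is exactly Python's test[0] — no IndexError possible)
def pvStepA (fields : List (List Char)) (d : PySem.Dict (List Char) (List Char))
    (credit : List Char) : PySem.Dict (List Char) (List Char) :=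
  let test := PySem.Chars.splitOn credit [' ']
  let t0 := test.headD []
  if t0 ∈ fields then
    let parts := PySem.Chars.splitOn (pyRemovePrefixC credit (t0 ++ [' '])) [',', ' ']
    d.insert t0 (PySem.Chars.join [',', ' '] parts)
  else d

-- result = {field: '' for field in fields}
def pvInit : PySem.Dict (List Char) (List Char) :=
  pvFields.foldl (fun d f => d.insert f []) PySem.Dict.empty

def extractCreditsInfo (credits : List String) : String × String × String :=
  match ((credits.map String.toList).foldl (pvStepA pvFields) pvInit).values with
  | [a, b, c] => (String.ofList a, String.ofList b, String.ofList c)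
  | _ => ("", "", "")  -- unreachable: the dict always holds exactly the three field keys

-- ===== PORT B =====
-- last_value(field): scan credits, keep the last credit whose first space-token is `field`
def pvLastValue (credits : List (List Char)) (field : List Char) : List Char :=
  credits.foldl
    (fun value credit =>
      if (PySem.Chars.splitOn credit [' ']).headD [] = field then
        pyRemovePrefixC credit (field ++ [' '])
      else value) []

def extractCreditsInfo_alt (credits : List String) : String × String × String :=
  (String.ofList (pvLastValue (credits.map String.toList) "Designer".toList),
   String.ofList (pvLastValue (credits.map String.toList) "Artist".toList),
   String.ofList (pvLastValue (credits.map String.toList) "Publisher".toList))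

-- ===== PRECONDITION & SPEC =====
def Spec_extractCreditsInfo (credits : List String) (out : String × String × String) : Prop := out = extractCreditsInfo_alt credits
instance (credits : List String) (out : String × String × String) : Decidable (Spec_extractCreditsInfo credits out) := by unfold Spec_extractCreditsInfo; infer_instance

-- ===== CLAIM (what is proved, stated in full; the proofs are below) =====
def Claim_equal_extractCreditsInfo : Prop := ∀ (credits : List String), Dom_extractCreditsInfo credits → Spec_extractCreditsInfo credits (extractCreditsInfo credits)

-- ===== LEMMAS AND PROOFS =====

lemma join_cons_ne (sep x : List Char) (ys : List (List Char)) (h : ys ≠ []) :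
    PySem.Chars.join sep (x :: ys) = x ++ sep ++ PySem.Chars.join sep ys := by
  cases ys with
  | nil => simp at h
  | cons y t => simp [PySem.Chars.join, List.intercalate, List.intersperse]

-- merging the last two pieces (with the separator in between) does not change the joined string
lemma join_merge_last_two (sep : List Char) (xs : List (List Char)) (a b : List Char) :
    PySem.Chars.join sep (xs ++ [a, b]) = PySem.Chars.join sep (xs ++ [a ++ sep ++ b]) := by
  induction xs with
  | nil => simp [PySem.Chars.join, List.intercalate, List.intersperse]
  | cons x t ih =>
      rw [List.cons_append, List.cons_append,
        join_cons_ne sep x (t ++ [a, b]) (by simp),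
        join_cons_ne sep x (t ++ [a ++ sep ++ b]) (by simp), ih]

-- invariant of splitOn's worker: joining its output is joining "stop here, the rest is one piece"
lemma join_go (sep : List Char) : ∀ (fuel : Nat) (l cur : List Char) (acc : List (List Char)),
    PySem.Chars.join sep (PySem.Chars.splitOn.go sep fuel l cur acc)
      = PySem.Chars.join sep (((cur.reverse ++ l) :: acc).reverse) := by
  intro fuel
  induction fuel with
  | zero => intro l cur acc; simp [PySem.Chars.splitOn.go]
  | succ f ih =>
      intro l cur acc
      cases l with
      | nil => simp [PySem.Chars.splitOn.go]
      | cons c rest =>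
          rw [PySem.Chars.splitOn.go]
          by_cases hp : sep.isPrefixOf (c :: rest) = true
          · simp only [hp, if_true]
            rw [ih]
            have hpre : sep ++ (c :: rest).drop sep.length = c :: rest :=
              (List.prefix_iff_eq_append.mp (List.isPrefixOf_iff_prefix.mp hp))
            calc PySem.Chars.join sep ((([] ++ (c :: rest).drop sep.length) :: cur.reverse :: acc).reverse)
                = PySem.Chars.join sep (acc.reverse ++ [cur.reverse, (c :: rest).drop sep.length]) := by simp
              _ = PySem.Chars.join sep (acc.reverse ++ [cur.reverse ++ sep ++ (c :: rest).drop sep.length]) := join_merge_last_two ..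
              _ = PySem.Chars.join sep (((cur.reverse ++ (c :: rest)) :: acc).reverse) := by
                    rw [← hpre]; simp
          · rw [if_neg (by simp [hp]), ih]; simp

-- ', '.join(s.split(', ')) == s — the round-trip A performs on every stored value is the identity
lemma join_splitOn (sep cs : List Char) :
    PySem.Chars.join sep (PySem.Chars.splitOn cs sep) = cs := by
  rw [PySem.Chars.splitOn, join_go]
  simp [PySem.Chars.join, List.intercalate]

-- A's loop never adds or removes a key: the key list stays exactly pvFields
lemma keys_foldA : ∀ (cs : List (List Char)) (d : PySem.Dict (List Char) (List Char)),
    d.keys = pvFields → (cs.foldl (pvStepA pvFields) d).keys = pvFields := by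
  intro cs
  induction cs with
  | nil => intro d h; simpa using h
  | cons c t ih =>
      intro d h
      rw [List.foldl_cons]
      apply ih
      unfold pvStepA
      by_cases ht : (PySem.Chars.splitOn c [' ']).headD [] ∈ pvFields
      · simp only [ht, if_true]
        rw [PySem.Dict.keys_insert_of_contains, h]
        rw [PySem.Dict.contains_iff_mem_keys, h]
        exact ht
      · simp only [ht, if_false]; exact h

-- per field, A's dict entry after the loop is exactly B's last-match scan
lemma getD_foldA (f : List Char) (hf : f ∈ pvFields) :
    ∀ (cs : List (List Char)) (d : PySem.Dict (List Char) (List Char)),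
    (cs.foldl (pvStepA pvFields) d).getD f []
      = cs.foldl (fun value credit =>
          if (PySem.Chars.splitOn credit [' ']).headD [] = f then
            pyRemovePrefixC credit (f ++ [' '])
          else value) (d.getD f []) := by
  intro cs
  induction cs with
  | nil => intro d; rfl
  | cons c t ih =>
      intro d
      rw [List.foldl_cons, List.foldl_cons, ih]
      congr 1
      unfold pvStepA
      by_cases ht : (PySem.Chars.splitOn c [' ']).headD [] ∈ pvFields
      · simp only [ht, if_true]
        rw [PySem.Dict.getD_insert]
        by_cases hef : f = (PySem.Chars.splitOn c [' ']).headD []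
        · rw [if_pos hef, if_pos hef.symm, ← hef, join_splitOn]
        · rw [if_neg hef, if_neg (fun h => hef h.symm)]
      · simp only [ht, if_false]
        rw [if_neg ?_]
        intro h
        rw [h] at ht
        exact ht hf

lemma extractCreditsInfo_eq_alt : ∀ (credits : List String),
    extractCreditsInfo credits = extractCreditsInfo_alt credits := by
  intro credits
  unfold extractCreditsInfo extractCreditsInfo_alt
  have hk : ((credits.map String.toList).foldl (pvStepA pvFields) pvInit).keys = pvFields :=
    keys_foldA _ pvInit (by decide)
  have hnd : ((credits.map String.toList).foldl (pvStepA pvFields) pvInit).keys.Nodup := by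
    rw [hk]; decide
  have hv := PySem.Dict.values_eq_map_keys ((credits.map String.toList).foldl (pvStepA pvFields) pvInit) hnd []
  rw [hk] at hv
  have hv' : ((credits.map String.toList).foldl (pvStepA pvFields) pvInit).values
      = [((credits.map String.toList).foldl (pvStepA pvFields) pvInit).getD "Designer".toList [],
         ((credits.map String.toList).foldl (pvStepA pvFields) pvInit).getD "Artist".toList [],
         ((credits.map String.toList).foldl (pvStepA pvFields) pvInit).getD "Publisher".toList []] := by
    rw [hv]; rfl
  rw [hv']
  have h1 := getD_foldA "Designer".toList (by decide) (credits.map String.toList) pvInit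
  have h2 := getD_foldA "Artist".toList (by decide) (credits.map String.toList) pvInit
  have h3 := getD_foldA "Publisher".toList (by decide) (credits.map String.toList) pvInit
  have e1 : pvInit.getD "Designer".toList [] = [] := by decide
  have e2 : pvInit.getD "Artist".toList [] = [] := by decide
  have e3 : pvInit.getD "Publisher".toList [] = [] := by decide
  rw [e1] at h1; rw [e2] at h2; rw [e3] at h3
  rw [h1, h2, h3]
  rfl

-- ===== VERDICT (by name: the statement is the Claim_ definition above) =====
theorem extractCreditsInfo_spec : Claim_equal_extractCreditsInfo := by
  intro credits _
  exact extractCreditsInfo_eq_alt credits
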